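-- pv_equiv track=rewrite | github.com/Rajasekhar1131997/TIP102_Sessions | Unit_2/Week2Session2_SPSV2.py | is_valid_itinerary
-- ===== SOURCE A (Python) =====
-- def is_valid_itinerary(itinerary):
--     if not itinerary:
--         return False
--     counts = {}
--     for city in itinerary:
--         counts[city] = counts.get(city, 0) + 1
--     base = max(counts.keys())
--     if len(itinerary) != base + 1:
--         return False
--     if set(counts.keys()) != set(range(1,base+1)):
--         return False
--     if counts.get(base,0)!=2:
--         return False
--     for i in range(1,base):
--         if counts.get(i,0)!=1:
--             return False
--     return True
-- ===== SOURCE B (Python) =====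
-- def is_valid_itinerary(itinerary):
--     if not itinerary:
--         return False
--     base = max(itinerary)
--     if len(itinerary) != base + 1:
--         return False
--     return sorted(itinerary) == list(range(1, base)) + [base, base]
-- ===== Notes on version B (the rewrite author's own statement) =====
-- stated objective: simpler
-- what changed: Replaced the frequency-dict construction and per-key set/count checks by a single sort compared against the one canonical valid sequence list(range(1,base))+[base,base].
import Mathlib
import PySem

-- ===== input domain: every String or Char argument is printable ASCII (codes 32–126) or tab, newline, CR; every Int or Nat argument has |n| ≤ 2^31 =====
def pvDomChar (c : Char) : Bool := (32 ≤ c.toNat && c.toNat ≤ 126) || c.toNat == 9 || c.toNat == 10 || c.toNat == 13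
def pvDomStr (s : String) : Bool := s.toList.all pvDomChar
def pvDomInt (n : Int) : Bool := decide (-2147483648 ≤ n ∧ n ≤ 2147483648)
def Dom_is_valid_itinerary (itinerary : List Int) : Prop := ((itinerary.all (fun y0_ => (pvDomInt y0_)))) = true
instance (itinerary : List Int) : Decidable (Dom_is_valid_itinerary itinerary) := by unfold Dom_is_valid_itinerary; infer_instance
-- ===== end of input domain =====

-- B replaces A's frequency dict and per-key checks by one sort compared with the canonical valid sequence (objective: simpler).

-- ===== PORT A =====
def is_valid_itinerary (itinerary : List Int) : Bool :=
  if itinerary = [] then false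
  else
    let counts : PySem.Dict Int Int := itinerary.foldl (fun d x => d.insert x (d.getD x 0 + 1)) PySem.Dict.empty
    match PySem.List.max? counts.keys (fun x => x) with
    | none => false  -- unreachable: counts is nonempty since itinerary is nonempty
    | some base =>
      if (itinerary.length : Int) ≠ base + 1 then false
      else if ¬ PySem.Set.equal (PySem.Set.ofList counts.keys)
                  (PySem.Set.ofList (PySem.List.pyRange 1 (base + 1) 1)) then false
      else if counts.getD base 0 ≠ 2 then false
      else (PySem.List.pyRange 1 base 1).all (fun i => counts.getD i 0 == 1)

-- ===== PORT B =====
def is_valid_itinerary_alt (itinerary : List Int) : Bool :=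
  if itinerary = [] then false
  else
    match PySem.List.max? itinerary (fun x => x) with
    | none => false  -- unreachable: itinerary is nonempty
    | some base =>
      if (itinerary.length : Int) ≠ base + 1 then false
      else decide (PySem.List.sorted itinerary (fun x => x) false
                    = PySem.List.pyRange 1 base 1 ++ [base, base])

-- ===== PRECONDITION & SPEC =====
def Spec_is_valid_itinerary (itinerary : List Int) (out : Bool) : Prop := out = is_valid_itinerary_alt itinerary
instance (itinerary : List Int) (out : Bool) : Decidable (Spec_is_valid_itinerary itinerary out) := by unfold Spec_is_valid_itinerary; infer_instance

-- ===== CLAIM (what is proved, stated in full; the proofs are below) =====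
def Claim_equal_is_valid_itinerary : Prop := ∀ (itinerary : List Int), Dom_is_valid_itinerary itinerary → Spec_is_valid_itinerary itinerary (is_valid_itinerary itinerary)

-- ===== LEMMAS AND PROOFS =====

-- max? with identity key returns THE maximum value, so it agrees across lists with the same members
theorem max?_id_eq_of_same_mem (xs ys : List Int) (hys : ys ≠ [])
    (h : ∀ x, x ∈ xs ↔ x ∈ ys) :
    PySem.List.max? xs (fun x => x) = PySem.List.max? ys (fun x => x) := by
  have hxs : xs ≠ [] := by
    intro hn
    apply hys
    rw [List.eq_nil_iff_forall_not_mem]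
    intro y hy
    have := (h y).mpr hy
    simp [hn] at this
  cases hx : PySem.List.max? xs (fun x => x) with
  | none => rw [PySem.List.max?_eq_none_iff] at hx; exact absurd hx hxs
  | some m =>
    cases hy : PySem.List.max? ys (fun x => x) with
    | none => rw [PySem.List.max?_eq_none_iff] at hy; exact absurd hy hys
    | some m' =>
      have h1 := PySem.List.max?_mem hx
      have h2 := PySem.List.max?_mem hy
      have h3 := PySem.List.max?_isMax hx
      have h4 := PySem.List.max?_isMax hy
      have : m = m' := le_antisymm (h4 m ((h m).mp h1)) (h3 m' ((h m').mpr h2))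
      rw [this]

-- A's three per-key checks are exactly "sorted(itinerary) is the canonical sequence"
theorem main_eq (itinerary : List Int) (base : Int)
    (hlen : (itinerary.length : Int) = base + 1) :
    ((∀ x, x ∈ itinerary ↔ 1 ≤ x ∧ x < base + 1) ∧
     (List.count base itinerary : Int) = 2 ∧
     ∀ i, 1 ≤ i → i < base → (List.count i itinerary : Int) = 1)
    ↔ PySem.List.sorted itinerary (fun x => x) false
        = PySem.List.pyRange 1 base 1 ++ [base, base] := by
  constructor
  · rintro ⟨hset, hb2, hone⟩
    have hperm : (PySem.List.pyRange 1 base 1 ++ [base, base]).Perm itinerary := by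
      rw [List.perm_iff_count]
      intro a
      rw [List.count_append]
      by_cases hab : a = base
      · subst hab
        have hnm : a ∉ PySem.List.pyRange 1 a 1 := by
          simp [PySem.List.mem_pyRange_one]
        rw [List.count_eq_zero_of_not_mem hnm]
        have : List.count a [a, a] = 2 := by rw [List.count_cons_self, List.count_cons_self, List.count_nil]
        omega
      · by_cases hain : 1 ≤ a ∧ a < base
        · have h1 : List.count a (PySem.List.pyRange 1 base 1) = 1 := by
            apply le_antisymm
            · exact (List.nodup_iff_count_le_one.mp (PySem.List.nodup_pyRange_one 1 base)) a
            · exact List.one_le_count_iff.mpr (by rw [PySem.List.mem_pyRange_one]; omega)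
          have h2 : List.count a [base, base] = 0 := by
            simp [Ne.symm hab]
          have := hone a hain.1 hain.2
          omega
        · have hnot : a ∉ itinerary := by
            intro hmem
            have := (hset a).mp hmem
            omega
          have h1 : List.count a (PySem.List.pyRange 1 base 1) = 0 :=
            List.count_eq_zero_of_not_mem (by rw [PySem.List.mem_pyRange_one]; omega)
          have h2 : List.count a [base, base] = 0 := by
            simp [Ne.symm hab]
          rw [h1, h2, List.count_eq_zero_of_not_mem hnot]
    refine PySem.List.sorted_id_eq_of_perm_of_pairwise _ _ hperm ?_
    have hpw := PySem.List.pairwise_lt_pyRange_one (a := 1) (b := base)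
    refine List.pairwise_append.mpr ⟨hpw.imp le_of_lt, by simp, ?_⟩
    intro x hx y hy
    have hxb := (PySem.List.mem_pyRange_one.mp hx).2
    simp only [List.mem_cons, List.not_mem_nil, or_false] at hy
    rcases hy with rfl | rfl <;> omega
  · intro hsort
    have hperm : itinerary.Perm (PySem.List.pyRange 1 base 1 ++ [base, base]) := by
      have h := PySem.List.sorted_perm (xs := itinerary) (key := fun x => x) (rev := false)
      rw [hsort] at h
      exact h.symm
    have hcnt : ∀ a, List.count a itinerary
        = List.count a (PySem.List.pyRange 1 base 1) + List.count a [base, base] := by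
      intro a
      rw [hperm.count_eq, List.count_append]
    have hb1 : 1 ≤ base := by
      have hlenp := hperm.length_eq
      simp only [List.length_append, PySem.List.length_pyRange_one,
        List.length_cons, List.length_nil] at hlenp
      omega
    refine ⟨?_, ?_, ?_⟩
    · intro x
      rw [hperm.mem_iff]
      simp only [List.mem_append, PySem.List.mem_pyRange_one, List.mem_cons,
        List.not_mem_nil, or_false]
      omega
    · have hnm : base ∉ PySem.List.pyRange 1 base 1 := by
        simp [PySem.List.mem_pyRange_one]
      have h2 : List.count base [base, base] = 2 := by rw [List.count_cons_self, List.count_cons_self, List.count_nil]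
      have := hcnt base
      rw [List.count_eq_zero_of_not_mem hnm] at this
      omega
    · intro i hi1 hi2
      have h1 : List.count i (PySem.List.pyRange 1 base 1) = 1 := by
        apply le_antisymm
        · exact (List.nodup_iff_count_le_one.mp (PySem.List.nodup_pyRange_one 1 base)) i
        · exact List.one_le_count_iff.mpr (by rw [PySem.List.mem_pyRange_one]; omega)
      have h2 : List.count i [base, base] = 0 := by
        have : i ≠ base := by omega
        simp [Ne.symm this]
      have := hcnt i
      omega

-- ===== VERDICT (by name: the statement is the Claim_ definition above) =====
theorem is_valid_itinerary_spec : Claim_equal_is_valid_itinerary := by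
  intro itinerary _
  unfold Spec_is_valid_itinerary is_valid_itinerary is_valid_itinerary_alt
  by_cases hne : itinerary = []
  · simp [hne]
  · simp only [hne, if_false, PySem.Dict.foldl_insert_getD_add_one_eq_counter,
      PySem.Dict.keys_counter]
    rw [max?_id_eq_of_same_mem (PySem.Set.ofList itinerary) itinerary hne
      (fun x => PySem.Set.mem_ofList itinerary x)]
    cases hmax : PySem.List.max? itinerary (fun x => x) with
    | none => rfl
    | some base =>
      by_cases hlen : (itinerary.length : Int) = base + 1
      · have key := main_eq itinerary base hlen
        simp only [hlen, ne_eq, not_true_eq_false, if_false]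
        rw [Bool.eq_iff_iff]
        simp only [PySem.Set.ofList_ofList, PySem.Set.equal_iff, PySem.Set.mem_ofList,
          PySem.List.mem_pyRange_one, PySem.Dict.getD_counter,
          Bool.if_false_left, Bool.and_eq_true, Bool.not_eq_eq_eq_not, Bool.not_true,
          decide_eq_false_iff_not, not_not, and_imp, List.all_eq_true, beq_iff_eq,
          decide_eq_true_eq]
        exact key
      · simp [hlen]
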